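-- pv_equiv track=rewrite | github.com/HTaeha/Algorithm_study | Hong/Kakao/2019_Kakao_winter_internship/cross_stepping_stone.py | solution
-- ===== SOURCE A (Python) =====
-- def solution(stones, k):
--     answer = 0
--
--     zero_idx = []
--     stones_with_idx = dict()
--     for i, s in enumerate(stones):
--         if s not in stones_with_idx:
--             stones_with_idx[s] = [i]
--         else:
--             stones_with_idx[s].append(i)
--
--     sorted_stones = sorted(stones_with_idx.items(), key = lambda x:-x[0])
--     while check(zero_idx, k):
--         (min_s, idxs) = sorted_stones.pop()
--
--         answer = min_s
--         zero_idx += idxs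
--
--     return answer
--
-- def check(zero_idx, k):
--     if len(zero_idx) == 0:
--         return True
--     elif len(zero_idx) == 1 and k == 1:
--         return False
--     sorted_zero = sorted(zero_idx)
--
--     count = 0
--     prev = sorted_zero[0]
--     for i in range(1, len(sorted_zero)):
--         if sorted_zero[i] == prev + 1:
--             count += 1
--         else:
--             count = 0
--
--         if count == k-1:
--             return False
--
--         prev = sorted_zero[i]
--
--     return True
-- ===== SOURCE B (Python) =====
-- def solution(stones, k):
--     # min over all windows of k consecutive stones of the window maximum
--     best = None
--     for i in range(len(stones) - k + 1):
--         m = stones[i]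
--         for j in range(i + 1, i + k):
--             if stones[j] > m:
--                 m = stones[j]
--         if best is None or m < best:
--             best = m
--     return best
-- ===== Notes on version B (the rewrite author's own statement) =====
-- stated objective: faster
-- what changed: A groups stones by value in a dict, sorts the groups descending, and repeatedly removes the smallest value, re-sorting and scanning the accumulated removed-index list until k consecutive stones are gone; B directly computes the minimum over all windows of k consecutive stones of the window maximum with one nested scan.
-- outside the precondition, e.g. on solution([1, 1, 3, 2], 1): A returns 2, B returns 1; on solution([1, 1, 5], 1): A raises IndexError, B returns 1
import Mathlib
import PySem

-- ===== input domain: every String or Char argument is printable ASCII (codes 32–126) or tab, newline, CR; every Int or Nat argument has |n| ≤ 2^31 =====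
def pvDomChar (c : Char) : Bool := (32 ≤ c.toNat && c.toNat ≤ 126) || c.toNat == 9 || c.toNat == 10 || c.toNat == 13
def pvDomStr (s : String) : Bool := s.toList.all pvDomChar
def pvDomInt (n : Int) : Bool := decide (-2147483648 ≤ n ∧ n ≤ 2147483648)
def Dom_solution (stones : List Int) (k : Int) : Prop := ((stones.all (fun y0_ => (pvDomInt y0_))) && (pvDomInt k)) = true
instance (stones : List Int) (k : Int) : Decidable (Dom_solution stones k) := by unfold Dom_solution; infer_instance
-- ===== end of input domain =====

-- B replaces A's value-grouping dict + descending sort + simulated stone-removal loop (re-sorting the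
-- removed-index list on every step) by a direct nested scan: minimum over all windows of k consecutive
-- stones of the window maximum.

-- ===== PORT A =====

-- helper 'check': the for-loop over sorted_zero[1:] with (prev, count)
def checkLoop (k : Int) (prev count : Int) : List Int → Bool
  | [] => true
  | x :: xs =>
    let count' := if x == prev + 1 then count + 1 else 0
    if count' == k - 1 then false else checkLoop k x count' xs

def check (zero_idx : List Int) (k : Int) : Bool :=
  if zero_idx.length == 0 then true
  else if zero_idx.length == 1 && k == 1 then false
  else
    match PySem.List.sorted zero_idx (fun x => x) with
    | [] => true  -- unreachable: zero_idx ≠ [] and sorted is a permutation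
    | p :: rest => checkLoop k p 0 rest

-- the 'while check(...)' loop; pop() = getLast + dropLast
def loopA (k : Int) (ss : List (Int × List Int)) (zero_idx : List Int) (answer : Int) : Int :=
  if check zero_idx k then
    match h : ss.getLast? with
    | none => answer  -- Python: '[].pop()' raises IndexError here (excluded by Pre_)
    | some p => loopA k ss.dropLast (zero_idx ++ p.2) p.1
  else answer
termination_by ss.length
decreasing_by
  have hne : ss ≠ [] := by
    intro hnil; rw [hnil] at h; simp at h
  have := List.length_pos_iff.mpr hne
  simp [List.length_dropLast]; omega

def solution (stones : List Int) (k : Int) : Int :=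
  let answer : Int := 0
  let stones_with_idx : PySem.Dict Int (List Int) :=
    (PySem.List.enumerate stones 0).foldl
      (fun d p =>
        if !(d.contains p.2) then d.insert p.2 [p.1]
        else d.modify p.2 [] (fun l => l ++ [p.1]))
      PySem.Dict.empty
  let sorted_stones := PySem.List.sorted stones_with_idx.items (fun x => -x.1)
  loopA k sorted_stones [] answer

-- ===== PORT B =====
def solution_alt (stones : List Int) (k : Int) : Int :=
  -- 'm' is the running window maximum, 'best' the running answer (None = not set yet);
  -- 'stones[i]'/'stones[j]' are pyGet? with the in-range default (indices are in range inside Pre_)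
  ((PySem.List.pyRange 0 (PySem.List.len stones - k + 1) 1).foldl
      (fun best i =>
        match best,
          (PySem.List.pyRange (i + 1) (i + k) 1).foldl
            (fun m j =>
              if (PySem.List.pyGet? stones j).getD 0 > m then (PySem.List.pyGet? stones j).getD 0
              else m)
            ((PySem.List.pyGet? stones i).getD 0) with
        | none, m => some m
        | some b, m => if m < b then some m else some b)
      none).getD 0  -- Python's 'best' is None only when there is no window (excluded by Pre_)

-- ===== PRECONDITION & SPEC =====
-- Pre_ restricts to the problem's natural domain 2 ≤ k ≤ len(stones).  Outside it A raises
-- IndexError (pop from an empty list) whenever k ≤ 0, k > len(stones) or stones is empty; for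
-- k == 1 A raises the same IndexError on many inputs and, where it does return, the value comes
-- from an accidental run-counting branch of `check` and can differ from the minimum stone.
def Pre_solution (stones : List Int) (k : Int) : Prop :=
  2 ≤ k ∧ k ≤ (stones.length : Int)
instance (stones : List Int) (k : Int) : Decidable (Pre_solution stones k) := by
  unfold Pre_solution; infer_instance

def pvWitness_solution : List Int × Int := ([1, 2, 3], 2)

def Spec_solution (stones : List Int) (k : Int) (out : Int) : Prop := out = solution_alt stones k
instance (stones : List Int) (k : Int) (out : Int) : Decidable (Spec_solution stones k out) := by
  unfold Spec_solution; infer_instance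

-- ===== CLAIM (what is proved, stated in full; the proofs are below) =====
def Claim_equal_solution : Prop := ∀ (stones : List Int) (k : Int), Dom_solution stones k → Pre_solution stones k → Spec_solution stones k (solution stones k)

-- ===== LEMMAS AND PROOFS =====

-- ---------- basic objects ----------

-- K consecutive integers starting at a
def consec (a : Int) (m : Nat) : List Int := (List.range m).map (fun d : Nat => a + (d : Int))

-- "some K consecutive integers appear contiguously in l"
def HasBlock (K : Nat) (l : List Int) : Prop := ∃ a : Int, consec a K <:+: l

-- the sorted list of (Int-cast) indices whose stone is ≤ v
def ZL (stones : List Int) (v : Int) : List Int :=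
  ((List.range stones.length).filter (fun j => stones.getD j 0 ≤ v)).map (fun j : Nat => (j : Int))

-- the index list A's dict stores for value v
def idxListP (stones : List Int) (v : Int) : List Int :=
  ((PySem.List.enumerate stones 0).filter (fun q => q.2 == v)).map (fun q => q.1)

def fPair (stones : List Int) (v : Int) : Int × List Int := (v, idxListP stones v)

-- distinct values of stones, ascending
def ascVals (stones : List Int) : List Int :=
  PySem.List.sorted (PySem.Set.ofList stones) (fun x => x)

-- "some window of K consecutive stones is entirely ≤ v"
def HasRun (stones : List Int) (K : Nat) (v : Int) : Prop :=
  ∃ a : Nat, a + K ≤ stones.length ∧ ∀ d < K, stones.getD (a + d) 0 ≤ v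

def hasRunB (stones : List Int) (K : Nat) (v : Int) : Bool :=
  (List.range (stones.length - K + 1)).any (fun a =>
    decide (a + K ≤ stones.length) && (List.range K).all (fun d => decide (stones.getD (a + d) 0 ≤ v)))

lemma hasRunB_iff (stones : List Int) (K : Nat) (v : Int) :
    hasRunB stones K v = true ↔ HasRun stones K v := by
  unfold hasRunB HasRun
  simp only [List.any_eq_true, List.mem_range, Bool.and_eq_true, List.all_eq_true, decide_eq_true_eq]
  constructor
  · rintro ⟨a, -, h1, h2⟩; exact ⟨a, h1, h2⟩
  · rintro ⟨a, h1, h2⟩; exact ⟨a, by omega, h1, h2⟩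

-- ---------- consec ----------

lemma consec_succ (a : Int) (m : Nat) : consec a (m + 1) = a :: consec (a + 1) m := by
  unfold consec
  rw [List.range_succ_eq_map, List.map_cons, List.map_map]
  simp only [Nat.cast_zero, add_zero, List.cons.injEq, true_and]
  apply List.map_congr_left
  intro d _
  simp [Nat.succ_eq_add_one]; push_cast; ring

lemma consec_ne_nil (a : Int) {m : Nat} (hm : 0 < m) : consec a m ≠ [] := by
  unfold consec
  simp [List.map_eq_nil_iff, List.range_eq_nil]; omega

lemma consec_prefix_mono (a : Int) {m1 m2 : Nat} (h : m2 ≤ m1) {l : List Int}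
    (hp : consec a m1 <+: l) : consec a m2 <+: l := by
  refine List.IsPrefix.trans ?_ hp
  have : consec a m2 = (consec a m1).take m2 := by
    unfold consec
    rw [← List.map_take, List.take_range, Nat.min_eq_left h]
  rw [this]; exact List.take_prefix _ _

lemma HasBlock_cons {K : Nat} (hK : 1 ≤ K) (x : Int) (rest : List Int) :
    HasBlock K (x :: rest) ↔ consec (x + 1) (K - 1) <+: rest ∨ HasBlock K rest := by
  unfold HasBlock
  constructor
  · rintro ⟨a, hinf⟩
    rcases List.infix_cons_iff.mp hinf with hpre | hinf'
    · obtain ⟨K', hK'⟩ : ∃ K', K = K' + 1 := ⟨K - 1, by omega⟩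
      subst hK'
      rw [consec_succ, List.cons_prefix_cons] at hpre
      obtain ⟨rfl, hp⟩ := hpre
      left; simpa using hp
    · exact Or.inr ⟨a, hinf'⟩
  · rintro (hp | ⟨a, hinf⟩)
    · refine ⟨x, List.infix_cons_iff.mpr (Or.inl ?_)⟩
      obtain ⟨K', hK'⟩ : ∃ K', K = K' + 1 := ⟨K - 1, by omega⟩
      subst hK'
      rw [consec_succ, List.cons_prefix_cons]
      exact ⟨rfl, by simpa using hp⟩
    · exact ⟨a, List.infix_cons_iff.mpr (Or.inr hinf)⟩

lemma HasBlock_nil {K : Nat} (hK : 1 ≤ K) : ¬ HasBlock K [] := by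
  rintro ⟨a, hinf⟩
  exact consec_ne_nil a hK (List.eq_nil_of_infix_nil hinf)

-- ---------- the scan in `check` ----------

lemma checkLoop_false_iff (k : Int) (hk : 2 ≤ k) :
    ∀ (xs : List Int) (prev count : Int), 0 ≤ count → count ≤ k - 2 →
      (checkLoop k prev count xs = false ↔
        consec (prev + 1) (k - 1 - count).toNat <+: xs ∨ HasBlock k.toNat xs) := by
  intro xs
  induction xs with
  | nil =>
    intro prev count h0 h2
    simp only [checkLoop]
    constructor
    · intro h; exact absurd h (by simp)
    · rintro (hp | hb)
      · exact absurd (List.prefix_nil.mp hp) (consec_ne_nil _ (by omega))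
      · exact absurd hb (HasBlock_nil (by omega))
  | cons x rest ih =>
    intro prev count h0 h2
    have hK1 : 1 ≤ k.toNat := by omega
    by_cases hx : x = prev + 1
    · subst hx
      by_cases hdone : count + 1 = k - 1
      · have hL : checkLoop k prev count ((prev + 1) :: rest) = false := by
          simp [checkLoop, hdone]
        rw [hL]
        simp only [true_iff]
        left
        have h1 : (k - 1 - count).toNat = 1 := by omega
        rw [h1]
        have h2'' : consec (prev + 1) 1 = [prev + 1] := by
          unfold consec; simp
        rw [h2'']
        simp
      · have hL : checkLoop k prev count ((prev + 1) :: rest) =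
            checkLoop k (prev + 1) (count + 1) rest := by
          simp only [checkLoop]
          have h2' : (count + 1 == k - 1) = false := by simp [hdone]
          simp [h2']
        rw [hL, ih (prev + 1) (count + 1) (by omega) (by omega)]
        have hm : (k - 1 - count).toNat = (k - 1 - (count + 1)).toNat + 1 := by omega
        constructor
        · rintro (hp | hb)
          · left
            rw [hm, consec_succ, List.cons_prefix_cons]
            exact ⟨rfl, by simpa using hp⟩
          · right; exact (HasBlock_cons hK1 (prev + 1) rest).mpr (Or.inr hb)
        · rintro (hp | hb)
          · rw [hm, consec_succ, List.cons_prefix_cons] at hp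
            left; simpa using hp.2
          · rcases (HasBlock_cons hK1 (prev + 1) rest).mp hb with hp | hb'
            · left
              have hle : (k - 1 - (count + 1)).toNat ≤ k.toNat - 1 := by omega
              exact consec_prefix_mono _ hle hp
            · right; exact hb'
    · have hL : checkLoop k prev count (x :: rest) = checkLoop k x 0 rest := by
        simp only [checkLoop]
        have h1 : (x == prev + 1) = false := by simp [hx]
        have h2' : ((0 : Int) == k - 1) = false := by
          simp only [beq_eq_false_iff_ne, ne_eq]; omega
        simp [h1, h2']
      rw [hL, ih x 0 le_rfl (by omega)]
      have hm0 : (k - 1 - 0).toNat = k.toNat - 1 := by omega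
      rw [hm0]
      constructor
      · rintro (hp | hb)
        · right; exact (HasBlock_cons hK1 x rest).mpr (Or.inl hp)
        · right; exact (HasBlock_cons hK1 x rest).mpr (Or.inr hb)
      · rintro (hp | hb)
        · exfalso
          have hlen : 1 ≤ (k - 1 - count).toNat := by omega
          obtain ⟨m', hm'⟩ : ∃ m', (k - 1 - count).toNat = m' + 1 :=
            ⟨(k - 1 - count).toNat - 1, by omega⟩
          rw [hm', consec_succ, List.cons_prefix_cons] at hp
          exact hx hp.1.symm
        · rcases (HasBlock_cons hK1 x rest).mp hb with hp | hb'
          · exact Or.inl hp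
          · exact Or.inr hb'

lemma check_false_iff (zero : List Int) (k : Int) (hk : 2 ≤ k) :
    check zero k = false ↔ HasBlock k.toNat (PySem.List.sorted zero (fun x => x)) := by
  unfold check
  rcases List.eq_nil_or_concat zero with rfl | ⟨z', a, rfl⟩
  · have : PySem.List.sorted ([] : List Int) (fun x => x) = [] := by
      rw [PySem.List.sorted_eq_nil_iff]
    simp [this]
    exact HasBlock_nil (by omega)
  · simp only [List.concat_eq_append]
    have hne : (z' ++ [a]) ≠ [] := by simp
    have hlen0 : ((z' ++ [a]).length == 0) = false := by
      simp
    have hk1 : (k == 1) = false := by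
      simp only [beq_eq_false_iff_ne, ne_eq]; omega
    rw [hlen0]
    simp only [Bool.false_eq_true, if_false, hk1, Bool.and_false]
    have hsne : PySem.List.sorted (z' ++ [a]) (fun x => x) ≠ [] := by
      rw [ne_eq, PySem.List.sorted_eq_nil_iff]; simp
    rcases hs : PySem.List.sorted (z' ++ [a]) (fun x => x) with _ | ⟨p, rest⟩
    · exact absurd hs hsne
    · rw [checkLoop_false_iff k hk rest p 0 le_rfl (by omega)]
      have : (k - 1 - 0).toNat = k.toNat - 1 := by omega
      rw [this]
      exact (HasBlock_cons (by omega) p rest).symm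

-- ---------- ZL and idxListP ----------

lemma mem_ZL {stones : List Int} {v x : Int} :
    x ∈ ZL stones v ↔ ∃ j : Nat, j < stones.length ∧ x = (j : Int) ∧ stones.getD j 0 ≤ v := by
  unfold ZL
  simp only [List.mem_map, List.mem_filter, List.mem_range, decide_eq_true_eq]
  constructor
  · rintro ⟨j, ⟨hj, hle⟩, rfl⟩; exact ⟨j, hj, rfl, hle⟩
  · rintro ⟨j, hj, rfl, hle⟩; exact ⟨j, ⟨hj, hle⟩, rfl⟩

lemma ZL_pairwise (stones : List Int) (v : Int) :
    (ZL stones v).Pairwise (· < ·) := by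
  unfold ZL
  refine List.Pairwise.map _ ?_ ((List.pairwise_lt_range).sublist List.filter_sublist)
  intro a b hab
  exact_mod_cast hab

lemma ZL_nodup (stones : List Int) (v : Int) : (ZL stones v).Nodup :=
  (ZL_pairwise stones v).imp (fun h => ne_of_lt h)

lemma mem_idxListP {stones : List Int} {v x : Int} :
    x ∈ idxListP stones v ↔ ∃ j : Nat, j < stones.length ∧ x = (j : Int) ∧ stones.getD j 0 = v := by
  unfold idxListP
  simp only [List.mem_map, List.mem_filter, PySem.List.mem_enumerate_iff]
  constructor
  · rintro ⟨⟨i, s⟩, ⟨⟨j, hj, hpair⟩, heq⟩, rfl⟩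
    obtain ⟨rfl, rfl⟩ := Prod.mk.injEq .. ▸ hpair
    refine ⟨j, hj, by simp, ?_⟩
    have := List.getD_eq_getElem stones 0 hj
    rw [this]
    simpa using heq
  · rintro ⟨j, hj, rfl, hs⟩
    refine ⟨((j : Int), stones[j]), ⟨⟨j, hj, by simp⟩, ?_⟩, rfl⟩
    rw [List.getD_eq_getElem stones 0 hj] at hs
    simpa using hs

lemma idxListP_pairwise (stones : List Int) (v : Int) :
    (idxListP stones v).Pairwise (· < ·) := by
  unfold idxListP
  exact List.Pairwise.map _ (fun _ _ h => h)
    ((PySem.List.pairwise_lt_enumerate stones 0).sublist List.filter_sublist)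

lemma idxListP_nodup (stones : List Int) (v : Int) : (idxListP stones v).Nodup :=
  (idxListP_pairwise stones v).imp (fun h => ne_of_lt h)

-- ---------- HasBlock on ZL ↔ HasRun ----------

lemma hasBlock_ZL_iff {stones : List Int} {K : Nat} (hK : 1 ≤ K) (v : Int) :
    HasBlock K (ZL stones v) ↔ HasRun stones K v := by
  constructor
  · rintro ⟨a, hinf⟩
    have hmem : ∀ d < K, a + (d : Int) ∈ ZL stones v := by
      intro d hd
      exact hinf.mem (by exact List.mem_map_of_mem (by simpa using hd))
    obtain ⟨a0, ha0lt, ha0, -⟩ := mem_ZL.mp (by simpa using hmem 0 hK)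
    refine ⟨a0, ?_, ?_⟩
    · obtain ⟨j, hj, hje, -⟩ := mem_ZL.mp (hmem (K - 1) (by omega))
      have : a0 + (K - 1) = j := by omega
      omega
    · intro d hd
      obtain ⟨j, hj, hje, hjle⟩ := mem_ZL.mp (hmem d hd)
      have : a0 + d = j := by omega
      rwa [this]
  · rintro ⟨a0, hlen, hall⟩
    refine ⟨(a0 : Int), ?_⟩
    have hr : List.range stones.length =
        List.range' 0 a0 ++ List.range' a0 K ++ List.range' (a0 + K) (stones.length - a0 - K) := by
      have hsum : stones.length = a0 + K + (stones.length - a0 - K) := by omega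
      have h1 : List.range' 0 (a0 + K) = List.range' 0 a0 ++ List.range' a0 K := by
        have := List.range'_append (s := 0) (m := a0) (n := K) (step := 1)
        simpa using this.symm
      have h2 : List.range' 0 (a0 + K + (stones.length - a0 - K)) =
          List.range' 0 (a0 + K) ++ List.range' (a0 + K) (stones.length - a0 - K) := by
        have := List.range'_append (s := 0) (m := a0 + K) (n := stones.length - a0 - K) (step := 1)
        simpa using this.symm
      rw [List.range_eq_range', hsum, h2, h1]
      have h3 : a0 + K + (stones.length - a0 - K) - a0 - K = stones.length - a0 - K := by omega
      rw [h3]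
    have hmid : (List.range' a0 K).filter (fun j => stones.getD j 0 ≤ v) = List.range' a0 K := by
      rw [List.filter_eq_self]
      intro j hj
      rw [List.mem_range'_1] at hj
      have : j = a0 + (j - a0) := by omega
      rw [this]
      exact decide_eq_true (hall (j - a0) (by omega))
    have hcons : (List.range' a0 K).map (fun j : Nat => (j : Int)) = consec (a0 : Int) K := by
      rw [List.range'_eq_map_range, List.map_map]
      unfold consec
      apply List.map_congr_left
      intro d _
      simp
    unfold ZL
    rw [hr, List.filter_append, List.filter_append, hmid, List.map_append, List.map_append, hcons]
    exact ⟨_, _, rfl⟩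

-- ---------- updating zero_idx keeps it a sorted index set ----------

lemma sorted_append_eq_ZL {stones : List Int} {w v : Int} {zero : List Int}
    (hw : PySem.List.sorted zero (fun x => x) = ZL stones w)
    (hlt : w < v)
    (hgap : ∀ x ∈ stones, x ≤ v → x ≤ w ∨ x = v) :
    PySem.List.sorted (zero ++ idxListP stones v) (fun x => x) = ZL stones v := by
  have hperm0 : zero.Perm (ZL stones w) := by
    rw [← hw]; exact (PySem.List.sorted_perm zero (fun x => x) false).symm
  apply PySem.List.sorted_eq_of_perm_of_pairwise_lt
  · -- ZL v is a permutation of zero ++ idxListP v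
    apply (List.perm_ext_iff_of_nodup (ZL_nodup stones v) ?_).mpr
    · intro x
      rw [mem_ZL, List.mem_append, mem_idxListP]
      constructor
      · rintro ⟨j, hj, rfl, hle⟩
        have hmem : stones.getD j 0 ∈ stones := by
          rw [List.getD_eq_getElem stones 0 hj]; exact List.getElem_mem hj
        rcases hgap _ hmem hle with hle' | heq
        · left
          rw [hperm0.mem_iff, mem_ZL]
          exact ⟨j, hj, rfl, hle'⟩
        · right; exact ⟨j, hj, rfl, heq⟩
      · rintro (hx | hx)
        · rw [hperm0.mem_iff, mem_ZL] at hx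
          obtain ⟨j, hj, rfl, hle⟩ := hx
          exact ⟨j, hj, rfl, le_trans hle (le_of_lt hlt)⟩
        · obtain ⟨j, hj, rfl, heq⟩ := hx
          exact ⟨j, hj, rfl, le_of_eq heq⟩
    · -- zero ++ idxListP v has no duplicates
      rw [List.nodup_append]
      refine ⟨hperm0.nodup_iff.mpr (ZL_nodup stones w), idxListP_nodup stones v, ?_⟩
      intro x hx1 y hy2
      rw [hperm0.mem_iff, mem_ZL] at hx1
      rw [mem_idxListP] at hy2
      obtain ⟨j, hj, rfl, hle⟩ := hx1
      obtain ⟨j', hj', rfl, heq⟩ := hy2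
      intro hxy
      have : j = j' := by exact_mod_cast hxy
      subst this
      rw [heq] at hle
      omega
  · exact ZL_pairwise stones v

-- ---------- the grouping dict of A ----------

def buildDict (stones : List Int) : PySem.Dict Int (List Int) :=
  (PySem.List.enumerate stones 0).foldl
    (fun d p =>
      if !(d.contains p.2) then d.insert p.2 [p.1]
      else d.modify p.2 [] (fun l => l ++ [p.1]))
    PySem.Dict.empty

lemma buildDict_eq_modify (stones : List Int) :
    buildDict stones =
      (PySem.List.enumerate stones 0).foldl
        (fun d p => d.modify p.2 [] (fun l => l ++ [p.1])) PySem.Dict.empty := by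
  unfold buildDict
  apply PySem.List.foldl_congr_mem
  intro d p _
  by_cases h : d.contains p.2
  · simp [h]
  · have h' : d.contains p.2 = false := by simpa using h
    simp only [h', Bool.not_false, if_true]
    rw [PySem.Dict.modify, PySem.Dict.getD_of_not_contains d [] h', List.nil_append]

lemma keys_buildDict (stones : List Int) :
    (buildDict stones).keys = PySem.Set.ofList stones := by
  rw [buildDict_eq_modify]
  rw [PySem.Dict.keys_foldl_modify_key (PySem.List.enumerate stones 0) (fun p => p.2) []
    (fun _ p => fun l => l ++ [p.1]) PySem.Dict.empty]
  have h1 : (PySem.Dict.empty : PySem.Dict Int (List Int)).keys = ([] : List Int) := by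
    simp [pysem]
  rw [h1]
  have h2 : (PySem.List.enumerate stones 0).map (fun p => p.2) = stones :=
    PySem.List.map_snd_enumerate stones 0
  rw [h2]
  exact PySem.Set.update_empty stones

lemma nodup_keys_buildDict (stones : List Int) : (buildDict stones).keys.Nodup := by
  rw [keys_buildDict]; exact PySem.Set.nodup_ofList stones

lemma getD_buildDict (stones : List Int) (v : Int) :
    (buildDict stones).getD v [] = idxListP stones v := by
  rw [buildDict_eq_modify]
  have hswap :
      (PySem.List.enumerate stones 0).foldl
        (fun d p => d.modify p.2 [] (fun l => l ++ [p.1])) PySem.Dict.empty =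
      ((PySem.List.enumerate stones 0).map (fun q => (q.2, q.1))).foldl
        (fun d p => d.modify p.1 [] (fun l => l ++ [p.2])) PySem.Dict.empty := by
    rw [List.foldl_map]
  rw [hswap, PySem.Dict.getD_foldl_modify_append]
  have h0 : (PySem.Dict.empty : PySem.Dict Int (List Int)).getD v [] = [] := by
    simp [pysem]
  rw [h0, List.nil_append, List.filter_map, List.map_map]
  unfold idxListP
  congr 1

lemma get?_buildDict {stones : List Int} {v : Int} (hv : v ∈ stones) :
    (buildDict stones).get? v = some (idxListP stones v) := by
  have hc : (buildDict stones).contains v = true := by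
    rw [PySem.Dict.contains_iff_mem_keys, keys_buildDict, PySem.Set.mem_ofList]
    exact hv
  rw [PySem.Dict.contains_eq_isSome_get?] at hc
  obtain ⟨l, hl⟩ := Option.isSome_iff_exists.mp hc
  have := PySem.Dict.getD_of_get?_eq_some (buildDict stones) [] hl
  rw [getD_buildDict] at this
  rw [hl, this]

lemma mem_items_buildDict {stones : List Int} {p : Int × List Int} :
    p ∈ (buildDict stones).items ↔ p.1 ∈ stones ∧ p.2 = idxListP stones p.1 := by
  obtain ⟨pk, pv⟩ := p
  simp only
  constructor
  · intro hp
    have hget := PySem.Dict.get?_of_mem_items (buildDict stones) hp (nodup_keys_buildDict stones)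
    have hmem : pk ∈ stones := by
      have : (buildDict stones).contains pk = true := by
        rw [PySem.Dict.contains_eq_isSome_get?, hget]; rfl
      rw [PySem.Dict.contains_iff_mem_keys, keys_buildDict, PySem.Set.mem_ofList] at this
      exact this
    refine ⟨hmem, ?_⟩
    have h2 := get?_buildDict hmem
    rw [hget] at h2
    exact Option.some_injective _ h2
  · rintro ⟨hmem, hsnd⟩
    subst hsnd
    exact PySem.Dict.mem_items_of_get?_eq_some (buildDict stones) (get?_buildDict hmem)

lemma nodup_items_buildDict (stones : List Int) : (buildDict stones).items.Nodup := by
  have h := nodup_keys_buildDict stones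
  simp only [PySem.Dict.keys] at h
  exact h.of_map

-- ---------- distinct values, ascending ----------

lemma ascVals_pairwise (stones : List Int) : (ascVals stones).Pairwise (· < ·) :=
  PySem.List.sorted_ofList_pairwise_lt stones

lemma ascVals_nodup (stones : List Int) : (ascVals stones).Nodup :=
  (ascVals_pairwise stones).imp (fun h => ne_of_lt h)

lemma mem_ascVals {stones : List Int} {v : Int} : v ∈ ascVals stones ↔ v ∈ stones := by
  unfold ascVals
  rw [PySem.List.mem_sorted, PySem.Set.mem_ofList]

-- the sorted item list of A's dict is the descending value list with its index lists
lemma sorted_items_eq (stones : List Int) :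
    PySem.List.sorted (buildDict stones).items (fun x => -x.1) =
      (ascVals stones).reverse.map (fPair stones) := by
  apply PySem.List.sorted_eq_of_perm_of_pairwise_lt
  · apply (List.perm_ext_iff_of_nodup ?_ (nodup_items_buildDict stones)).mpr
    · intro p
      rw [mem_items_buildDict]
      simp only [List.mem_map, List.mem_reverse, mem_ascVals]
      constructor
      · rintro ⟨v, hv, rfl⟩
        exact ⟨hv, rfl⟩
      · rintro ⟨h1, h2⟩
        refine ⟨p.1, h1, ?_⟩
        unfold fPair
        rw [← h2]
    · refine List.Nodup.map ?_ (List.nodup_reverse.mpr (ascVals_nodup stones))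
      intro a b hab
      have : (fPair stones a).1 = (fPair stones b).1 := by rw [hab]
      simpa [fPair] using this
  · rw [List.pairwise_map]
    have h := (ascVals_pairwise stones).reverse
    refine h.imp ?_
    intro a b hab
    simp only [fPair]
    omega

-- ---------- the while-loop of A ----------

lemma loopA_concat (k : Int) (L : List (Int × List Int)) (x : Int × List Int)
    (zero : List Int) (ans : Int) :
    loopA k (L ++ [x]) zero ans =
      if check zero k then loopA k L (zero ++ x.2) x.1 else ans := by
  rw [loopA]
  by_cases hc : check zero k
  · rw [if_pos hc, if_pos hc]
    split
    next heq => rw [List.getLast?_concat] at heq; exact absurd heq (by simp)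
    next p heq =>
      rw [List.getLast?_concat] at heq
      obtain rfl : x = p := Option.some_injective _ heq
      rw [List.dropLast_concat]
  · rw [if_neg hc, if_neg hc]

lemma loop_run (stones : List Int) (k : Int) (hk : 2 ≤ k) :
    ∀ (vs : List Int) (w : Int) (zero : List Int) (ans : Int),
      vs.Pairwise (· < ·) →
      (∀ x, x ∈ vs ↔ x ∈ stones ∧ w < x) →
      PySem.List.sorted zero (fun y => y) = ZL stones w →
      ¬ HasBlock k.toNat (ZL stones w) →
      (∃ u ∈ vs, hasRunB stones k.toNat u = true) →
      loopA k (vs.reverse.map (fPair stones)) zero ans =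
        (vs.find? (hasRunB stones k.toNat)).getD ans := by
  intro vs
  induction vs with
  | nil =>
    intro w zero ans _ _ _ _ hsome
    exact absurd hsome (by simp)
  | cons v vs' ih =>
    intro w zero ans hpw hmem hz hnb hsome
    have hcheck : check zero k = true := by
      cases hc : check zero k
      · exfalso
        have := (check_false_iff zero k hk).mp hc
        rw [hz] at this
        exact hnb this
      · rfl
    have hshape : (v :: vs').reverse.map (fPair stones) =
        vs'.reverse.map (fPair stones) ++ [fPair stones v] := by
      simp
    rw [hshape, loopA_concat, if_pos hcheck]
    have hvmem : v ∈ stones ∧ w < v := (hmem v).mp List.mem_cons_self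
    have hgap : ∀ x ∈ stones, x ≤ v → x ≤ w ∨ x = v := by
      intro x hx hxle
      by_cases hxw : x ≤ w
      · left; exact hxw
      · right
        have hxv : x ∈ v :: vs' := (hmem x).mpr ⟨hx, by omega⟩
        rcases List.mem_cons.mp hxv with rfl | hx'
        · rfl
        · have := List.rel_of_pairwise_cons hpw hx'
          omega
    have hupd : PySem.List.sorted (zero ++ idxListP stones v) (fun y => y) = ZL stones v :=
      sorted_append_eq_ZL hz hvmem.2 hgap
    by_cases hrun : hasRunB stones k.toNat v = true
    · have hnb' : HasBlock k.toNat (ZL stones v) :=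
        (hasBlock_ZL_iff (by omega) v).mpr ((hasRunB_iff stones k.toNat v).mp hrun)
      have hcf : check (zero ++ (fPair stones v).2) k = false := by
        show check (zero ++ idxListP stones v) k = false
        rw [check_false_iff _ k hk, hupd]
        exact hnb'
      rw [loopA, hcf]
      simp only [Bool.false_eq_true, if_false]
      rw [List.find?_cons_of_pos hrun]
      rfl
    · have hmem' : ∀ x, x ∈ vs' ↔ x ∈ stones ∧ v < x := by
        intro x
        constructor
        · intro hx'
          exact ⟨((hmem x).mp (List.mem_cons_of_mem _ hx')).1,
                 List.rel_of_pairwise_cons hpw hx'⟩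
        · rintro ⟨hx, hvx⟩
          have : x ∈ v :: vs' := (hmem x).mpr ⟨hx, by omega⟩
          rcases List.mem_cons.mp this with rfl | hx'
          · omega
          · exact hx'
      have hnb2 : ¬ HasBlock k.toNat (ZL stones v) := fun h =>
        hrun ((hasRunB_iff stones k.toNat v).mpr ((hasBlock_ZL_iff (by omega) v).mp h))
      have hsome' : ∃ u ∈ vs', hasRunB stones k.toNat u = true := by
        obtain ⟨u, hu, hru⟩ := hsome
        rcases List.mem_cons.mp hu with rfl | hu'
        · exact absurd hru hrun
        · exact ⟨u, hu', hru⟩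
      have hstep := ih v (zero ++ (fPair stones v).2) v hpw.of_cons hmem' hupd hnb2 hsome'
      have hf1 : (fPair stones v).1 = v := rfl
      rw [hf1, hstep]
      obtain ⟨u, hu', hru⟩ := hsome'
      obtain ⟨r, hr⟩ := Option.isSome_iff_exists.mp (List.find?_isSome.mpr ⟨u, hu', hru⟩)
      rw [List.find?_cons_of_neg hrun, hr]
      rfl

-- ---------- A returns the least value opening a window ----------

lemma exists_run_max (stones : List Int) (k : Int) (hk2 : 2 ≤ k)
    (hkn : k ≤ (stones.length : Int)) :
    ∃ u ∈ ascVals stones, hasRunB stones k.toNat u = true := by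
  obtain ⟨s0, t, rfl⟩ : ∃ s0 t, stones = s0 :: t := by
    cases stones with
    | nil => simp at hkn; omega
    | cons a b => exact ⟨a, b, rfl⟩
  have hmax := PySem.List.le_foldl_max t s0
  have hall : ∀ y ∈ s0 :: t, y ≤ t.foldl max s0 := by
    intro y hy
    rcases List.mem_cons.mp hy with rfl | hy'
    · exact hmax.1
    · exact hmax.2 y hy'
  have humem : t.foldl max s0 ∈ s0 :: t := by
    rcases PySem.List.foldl_max_mem t s0 with h | h
    · rw [h]; exact List.mem_cons_self
    · exact List.mem_cons_of_mem _ h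
  refine ⟨t.foldl max s0, mem_ascVals.mpr humem, ?_⟩
  rw [hasRunB_iff]
  refine ⟨0, ?_, ?_⟩
  · have : (k.toNat : Int) = k := by omega
    omega
  · intro d hd
    have hdlt : d < (s0 :: t).length := by
      have : ((s0 :: t).length : Int) ≥ k := hkn
      omega
    rw [List.getD_eq_getElem _ 0 (by simpa using hdlt)]
    exact hall _ (List.getElem_mem _)

lemma solution_eq_find (stones : List Int) (k : Int) (h2 : 2 ≤ k)
    (hn : k ≤ (stones.length : Int)) :
    solution stones k = ((ascVals stones).find? (hasRunB stones k.toNat)).getD 0 := by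
  have hbody : solution stones k =
      loopA k (PySem.List.sorted (buildDict stones).items (fun x => -x.1)) [] 0 := rfl
  rw [hbody, sorted_items_eq]
  have hZnil : ZL stones ((stones.foldl min 0) - 1) = [] := by
    unfold ZL
    rw [List.map_eq_nil_iff, List.filter_eq_nil_iff]
    intro j hj
    rw [List.mem_range] at hj
    rw [List.getD_eq_getElem _ 0 hj]
    have := (PySem.List.foldl_min_le stones 0).2 _ (List.getElem_mem hj)
    simp only [decide_eq_true_eq]
    omega
  apply loop_run stones k h2 (ascVals stones) ((stones.foldl min 0) - 1) [] 0
  · exact ascVals_pairwise stones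
  · intro x
    rw [mem_ascVals]
    constructor
    · intro hx
      refine ⟨hx, ?_⟩
      have := (PySem.List.foldl_min_le stones 0).2 _ hx
      omega
    · exact fun h => h.1
  · rw [hZnil]
    rw [PySem.List.sorted_eq_nil_iff]
  · rw [hZnil]
    exact HasBlock_nil (by omega)
  · exact exists_run_max stones k h2 hn

-- ---------- B: window maxima ----------

def wmax (stones : List Int) (K : Nat) (i : Nat) : Int :=
  (List.range (K - 1)).foldl (fun m j => max m (stones.getD (i + 1 + j) 0)) (stones.getD i 0)

def bestStep (stones : List Int) (K : Nat) (best : Option Int) (i : Nat) : Option Int :=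
  match best, wmax stones K i with
  | none, m => some m
  | some b, m => if m < b then some m else some b

lemma wmax_eq_foldl_max (stones : List Int) (K : Nat) (i : Nat) :
    wmax stones K i =
      ((List.range (K - 1)).map (fun j => stones.getD (i + 1 + j) 0)).foldl max
        (stones.getD i 0) := by
  rw [List.foldl_map]
  rfl

lemma wmax_attained {stones : List Int} {K : Nat} (hK : 1 ≤ K) (i : Nat) :
    ∃ d < K, wmax stones K i = stones.getD (i + d) 0 := by
  rw [wmax_eq_foldl_max]
  rcases PySem.List.foldl_max_mem
      ((List.range (K - 1)).map (fun j => stones.getD (i + 1 + j) 0)) (stones.getD i 0) with h | h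
  · exact ⟨0, by omega, by simpa using h⟩
  · rw [List.mem_map] at h
    obtain ⟨j, hj, hje⟩ := h
    rw [List.mem_range] at hj
    exact ⟨1 + j, by omega, by rw [← hje]; congr 1; omega⟩

lemma wmax_ub {stones : List Int} {K : Nat} (hK : 1 ≤ K) (i : Nat) :
    ∀ d < K, stones.getD (i + d) 0 ≤ wmax stones K i := by
  intro d hd
  rw [wmax_eq_foldl_max]
  have hb := PySem.List.le_foldl_max
      ((List.range (K - 1)).map (fun j => stones.getD (i + 1 + j) 0)) (stones.getD i 0)
  rcases Nat.eq_zero_or_pos d with rfl | hdpos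
  · simpa using hb.1
  · refine hb.2 _ ?_
    rw [List.mem_map]
    exact ⟨d - 1, by rw [List.mem_range]; omega, by congr 1; omega⟩

-- B's program computes the bestStep fold over window starts
lemma solution_alt_eq_fold (stones : List Int) (k : Int) (h2 : 2 ≤ k)
    (hn : k ≤ (stones.length : Int)) :
    solution_alt stones k =
      ((List.range (stones.length - k.toNat + 1)).foldl (bestStep stones k.toNat) none).getD 0 := by
  have houter : PySem.List.pyRange 0 (PySem.List.len stones - k + 1) 1 =
      (List.range (stones.length - k.toNat + 1)).map (fun i : Nat => (i : Int)) := by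
    rw [PySem.List.len_eq, PySem.List.pyRange_one]
    have hcnt : (((stones.length : Int)) - k + 1 - 0).toNat = stones.length - k.toNat + 1 := by
      omega
    rw [hcnt]
    apply List.map_congr_left
    intro j _
    simp
  show ((PySem.List.pyRange 0 (PySem.List.len stones - k + 1) 1).foldl _ none).getD 0 = _
  rw [houter, List.foldl_map]
  congr 1
  apply PySem.List.foldl_congr_mem
  intro best i0 _
  have hm : ((PySem.List.pyRange ((i0 : Int) + 1) ((i0 : Int) + k) 1).foldl
      (fun m j =>
        if (PySem.List.pyGet? stones j).getD 0 > m then (PySem.List.pyGet? stones j).getD 0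
        else m)
      ((PySem.List.pyGet? stones (i0 : Int)).getD 0)) = wmax stones k.toNat i0 := by
    have hinner : PySem.List.pyRange ((i0 : Int) + 1) ((i0 : Int) + k) 1 =
        (List.range (k.toNat - 1)).map (fun j : Nat => ((i0 + 1 + j : Nat) : Int)) := by
      rw [PySem.List.pyRange_one]
      have hcnt : ((i0 : Int) + k - ((i0 : Int) + 1)).toNat = k.toNat - 1 := by omega
      rw [hcnt]
      apply List.map_congr_left
      intro j _
      push_cast
      ring
    rw [hinner, List.foldl_map]
    have h0 : (PySem.List.pyGet? stones (i0 : Int)).getD 0 = stones.getD i0 0 := by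
      rw [PySem.List.pyGet?_natCast, List.getD_eq_getElem?_getD]
    rw [h0]
    unfold wmax
    apply PySem.List.foldl_congr_mem
    intro m j _
    rw [PySem.List.pyGet?_natCast, ← List.getD_eq_getElem?_getD]
    by_cases h : stones.getD (i0 + 1 + j) 0 ≤ m
    · rw [if_neg (by omega), max_eq_left h]
    · rw [if_pos (by omega), max_eq_right (by omega)]
  rw [hm]
  rfl

-- the running minimum of the window maxima
lemma foldl_best_some (stones : List Int) (K : Nat) :
    ∀ (L : List Nat) (b : Int),
      ∃ m, L.foldl (bestStep stones K) (some b) = some m ∧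
        (m = b ∨ ∃ i ∈ L, m = wmax stones K i) ∧ m ≤ b ∧ ∀ i ∈ L, m ≤ wmax stones K i := by
  intro L
  induction L with
  | nil => intro b; exact ⟨b, rfl, Or.inl rfl, le_rfl, by simp⟩
  | cons i0 L' ih =>
    intro b
    by_cases h : wmax stones K i0 < b
    · obtain ⟨m, hm, hmem, hle, hall⟩ := ih (wmax stones K i0)
      refine ⟨m, ?_, ?_, by omega, ?_⟩
      · simpa [bestStep, h] using hm
      · rcases hmem with rfl | ⟨i, hi, rfl⟩
        · exact Or.inr ⟨i0, List.mem_cons_self, rfl⟩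
        · exact Or.inr ⟨i, List.mem_cons_of_mem _ hi, rfl⟩
      · intro i hi
        rcases List.mem_cons.mp hi with rfl | hi'
        · exact hle
        · exact hall i hi'
    · obtain ⟨m, hm, hmem, hle, hall⟩ := ih b
      refine ⟨m, ?_, ?_, hle, ?_⟩
      · simpa [bestStep, h] using hm
      · rcases hmem with rfl | ⟨i, hi, rfl⟩
        · exact Or.inl rfl
        · exact Or.inr ⟨i, List.mem_cons_of_mem _ hi, rfl⟩
      · intro i hi
        rcases List.mem_cons.mp hi with rfl | hi'
        · omega
        · exact hall i hi'

lemma foldl_best_none (stones : List Int) (K : Nat) (i0 : Nat) (L' : List Nat) :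
    ∃ m, (i0 :: L').foldl (bestStep stones K) none = some m ∧
      (∃ i ∈ i0 :: L', m = wmax stones K i) ∧ ∀ i ∈ i0 :: L', m ≤ wmax stones K i := by
  obtain ⟨m, hm, hmem, hle, hall⟩ := foldl_best_some stones K L' (wmax stones K i0)
  refine ⟨m, ?_, ?_, ?_⟩
  · simpa [bestStep] using hm
  · rcases hmem with rfl | ⟨i, hi, rfl⟩
    · exact ⟨i0, List.mem_cons_self, rfl⟩
    · exact ⟨i, List.mem_cons_of_mem _ hi, rfl⟩
  · intro i hi
    rcases List.mem_cons.mp hi with rfl | hi'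
    · exact hle
    · exact hall i hi'

-- find? on a strictly increasing list returns the least satisfying element
lemma find?_min_of_pairwise {p : Int → Bool} :
    ∀ {l : List Int}, l.Pairwise (· < ·) → ∀ {v : Int}, l.find? p = some v →
      ∀ u ∈ l, p u = true → v ≤ u := by
  intro l
  induction l with
  | nil => intro _ v h; simp at h
  | cons a l' ih =>
    intro hpw v hv u hu hpu
    by_cases hpa : p a = true
    · rw [List.find?_cons_of_pos hpa] at hv
      obtain rfl : a = v := Option.some_injective _ hv
      rcases List.mem_cons.mp hu with rfl | hu'
      · exact le_rfl
      · exact le_of_lt (List.rel_of_pairwise_cons hpw hu')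
    · rw [List.find?_cons_of_neg hpa] at hv
      rcases List.mem_cons.mp hu with rfl | hu'
      · exact absurd hpu hpa
      · exact ih hpw.of_cons hv u hu' hpu

lemma solution_alt_eq_find (stones : List Int) (k : Int) (h2 : 2 ≤ k)
    (hn : k ≤ (stones.length : Int)) :
    solution_alt stones k = ((ascVals stones).find? (hasRunB stones k.toNat)).getD 0 := by
  set K := k.toNat with hK
  set n := stones.length with hnn
  have hK2 : 2 ≤ K := by omega
  have hKn : K ≤ n := by omega
  -- the least value with a run
  obtain ⟨u0, hu0mem, hu0run⟩ := exists_run_max stones k h2 hn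
  obtain ⟨v, hv⟩ := Option.isSome_iff_exists.mp (List.find?_isSome.mpr ⟨u0, hu0mem, hu0run⟩)
  have hvrun : hasRunB stones K v = true := List.find?_some hv
  have hvmem : v ∈ stones := mem_ascVals.mp (List.mem_of_find?_eq_some hv)
  have hvmin : ∀ u ∈ stones, hasRunB stones K u = true → v ≤ u := by
    intro u hu hru
    exact find?_min_of_pairwise (ascVals_pairwise stones) hv u (mem_ascVals.mpr hu) hru
  -- the fold result
  obtain ⟨i0, L', hL⟩ : ∃ i0 L', List.range (n - K + 1) = i0 :: L' := by
    cases h : List.range (n - K + 1) with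
    | nil => exfalso; have := List.range_eq_nil.mp h; omega
    | cons a b => exact ⟨a, b, rfl⟩
  obtain ⟨m, hm, ⟨i1, hi1, hi1e⟩, hall⟩ := foldl_best_none stones K i0 L'
  have hbound : ∀ i ∈ i0 :: L', i + K ≤ n := by
    intro i hi
    rw [← hL, List.mem_range] at hi
    omega
  -- m ≥ v: every window max has a run and is a stone value
  have hmv : v ≤ m := by
    have hwin := hbound i1 hi1
    have hrun1 : hasRunB stones K (wmax stones K i1) = true := by
      rw [hasRunB_iff]
      refine ⟨i1, hwin, ?_⟩
      intro d hd
      exact wmax_ub (by omega) i1 d hd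
    have hmem1 : wmax stones K i1 ∈ stones := by
      obtain ⟨d, hd, he⟩ := wmax_attained (stones := stones) (K := K) (by omega) i1
      rw [he, List.getD_eq_getElem _ 0 (by omega)]
      exact List.getElem_mem _
    rw [hi1e]
    exact hvmin _ hmem1 hrun1
  -- m ≤ v: v's run gives a window with max ≤ v
  have hvm : m ≤ v := by
    obtain ⟨a, halen, hallle⟩ := (hasRunB_iff stones K v).mp hvrun
    have hamem : a ∈ i0 :: L' := by
      rw [← hL, List.mem_range]
      omega
    refine le_trans (hall a hamem) ?_
    obtain ⟨d, hd, he⟩ := wmax_attained (stones := stones) (K := K) (by omega) a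
    rw [he]
    exact hallle d hd
  have hmveq : m = v := le_antisymm hvm hmv
  rw [solution_alt_eq_fold stones k h2 hn, ← hK, ← hnn, hL, hm, hv]
  simpa using hmveq

-- ===== VERDICT (by name: the statement is the Claim_ definition above) =====
theorem solution_spec : Claim_equal_solution := by
  intro stones k _ hpre
  unfold Pre_solution at hpre
  obtain ⟨h2, hn⟩ := hpre
  unfold Spec_solution
  rw [solution_eq_find stones k h2 hn, solution_alt_eq_find stones k h2 hn]
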